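-- pv_equiv track=rewrite | github.com/MiemieYang-yang/agriculture-rag-agent | core/document_processor.py | _extract_table_blocks
-- ===== SOURCE A (Python) =====
-- from typing import List, Tuple
--
-- def _extract_table_blocks(text: str) -> Tuple[List[str], List[str]]:
--     """
--     分离表格块和普通文本块。
--
--     返回：(tables, non_table_text_parts)
--     """
--     tables = []
--     non_table_parts = []
--
--     lines = text.split('\n')
--     current_block = []
--     in_table = False
--
--     for line in lines:
--         # 判断是否为表格行
--         is_table_line = line.strip().startswith('|') and '|' in line[1:] if line.strip() else False
--
--         if is_table_line:
--             if not in_table: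
--                 # 结束当前非表格块
--                 if current_block:
--                     non_table_parts.append('\n'.join(current_block))
--                     current_block = []
--                 in_table = True
--             current_block.append(line)
--         else:
--             if in_table:
--                 # 结束当前表格块
--                 if current_block:
--                     tables.append('\n'.join(current_block))
--                     current_block = []
--                 in_table = False
--             current_block.append(line)
--
--     # 处理剩余块
--     if current_block:
--         if in_table:
--             tables.append('\n'.join(current_block))
--         else:
--             non_table_parts.append('\n'.join(current_block))
--
--     return tables, non_table_parts
-- ===== SOURCE B (Python) =====
-- from typing import List, Tuple
--
-- def _extract_table_blocks(text: str) -> Tuple[List[str], List[str]]: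
--     """Span scan: cut the line list into maximal runs of equal table-ness and
--     dispatch each joined run at once (no current-block/in-table state machine)."""
--     def is_table_line(line: str) -> bool:
--         return line.strip().startswith('|') and '|' in line[1:] if line.strip() else False
--
--     tables: List[str] = []
--     non_table_parts: List[str] = []
--     lines = text.split('\n')
--     i = 0
--     while i < len(lines):
--         key = is_table_line(lines[i])
--         j = i + 1
--         while j < len(lines) and is_table_line(lines[j]) == key:
--             j += 1
--         block = '\n'.join(lines[i:j])
--         (tables if key else non_table_parts).append(block)
--         i = j
--     return tables, non_table_parts
-- ===== Notes on version B (the rewrite author's own statement) =====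
-- stated objective: simpler
-- what changed: Replaces A's current-block/in-table state machine (with flush-on-transition and leftover-block handling) by a span scan that cuts the line list into maximal runs of equal table-ness and dispatches each joined run at once.
import Mathlib
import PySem

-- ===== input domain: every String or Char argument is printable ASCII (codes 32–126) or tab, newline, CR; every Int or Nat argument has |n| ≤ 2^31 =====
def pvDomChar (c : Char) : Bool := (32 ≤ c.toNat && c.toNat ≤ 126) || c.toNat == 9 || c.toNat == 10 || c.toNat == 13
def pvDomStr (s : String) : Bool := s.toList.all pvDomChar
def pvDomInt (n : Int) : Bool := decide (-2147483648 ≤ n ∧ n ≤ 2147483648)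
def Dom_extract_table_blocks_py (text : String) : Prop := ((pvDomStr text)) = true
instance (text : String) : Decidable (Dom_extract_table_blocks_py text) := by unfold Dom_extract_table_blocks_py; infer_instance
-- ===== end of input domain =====

-- B replaces A's current-block/in-table state machine by a span scan over maximal
-- runs of equal table-ness (objective: simpler); same return value everywhere.

-- shared classifier: line.strip().startswith('|') and '|' in line[1:] if line.strip() else False
def pvIsTable (line : String) : Bool :=
  let st := PySem.Str.strip line
  if st = "" then false
  else PySem.Str.startswith st "|" && PySem.Str.isIn "|" (PySem.Str.slice line (some 1) none)

-- ===== PORT A =====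
-- loop body of A's for-loop; state = (tables, non_table_parts, current_block, in_table)
def pvStepA (s : List String × List String × List String × Bool) (line : String) :
    List String × List String × List String × Bool :=
  let (tabs, nons, cur, inT) := s
  if pvIsTable line then
    if !inT then
      if cur = [] then (tabs, nons, cur ++ [line], true)
      else (tabs, nons ++ [PySem.Str.join "\n" cur], [line], true)
    else (tabs, nons, cur ++ [line], inT)
  else
    if inT then
      if cur = [] then (tabs, nons, cur ++ [line], false)
      else (tabs ++ [PySem.Str.join "\n" cur], nons, [line], false)
    else (tabs, nons, cur ++ [line], inT)

-- A's trailing-block handling after the loop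
def pvFinA (s : List String × List String × List String × Bool) : List String × List String :=
  let (tabs, nons, cur, inT) := s
  if cur = [] then (tabs, nons)
  else if inT then (tabs ++ [PySem.Str.join "\n" cur], nons)
  else (tabs, nons ++ [PySem.Str.join "\n" cur])

def extract_table_blocks_py (text : String) : List String × List String :=
  pvFinA ((((PySem.Str.split? text "\n").getD [])).foldl pvStepA ([], [], [], false))

-- ===== PORT B =====
-- B's outer while loop: take the maximal run with the first line's table-ness,
-- join it, dispatch it, continue after the run.
def pvLoopB (ls : List String) (tabs nons : List String) : List String × List String :=
  match ls with
  | [] => (tabs, nons)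
  | l :: rest =>
    let key := pvIsTable l
    let grp := l :: rest.takeWhile (fun x => pvIsTable x == key)
    let rest' := rest.dropWhile (fun x => pvIsTable x == key)
    if key then pvLoopB rest' (tabs ++ [PySem.Str.join "\n" grp]) nons
    else pvLoopB rest' tabs (nons ++ [PySem.Str.join "\n" grp])
termination_by ls.length
decreasing_by all_goals
  exact Nat.lt_succ_of_le (List.length_dropWhile_le _ _)

def extract_table_blocks_py_alt (text : String) : List String × List String :=
  pvLoopB (((PySem.Str.split? text "\n").getD [])) [] []

-- ===== PRECONDITION & SPEC =====
def Spec_extract_table_blocks_py (text : String) (out : List String × List String) : Prop := out = extract_table_blocks_py_alt text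
instance (text : String) (out : List String × List String) : Decidable (Spec_extract_table_blocks_py text out) := by unfold Spec_extract_table_blocks_py; infer_instance

-- ===== CLAIM (what is proved, stated in full; the proofs are below) =====
def Claim_equal_extract_table_blocks_py : Prop := ∀ (text : String), Dom_extract_table_blocks_py text → Spec_extract_table_blocks_py text (extract_table_blocks_py text)

-- ===== LEMMAS AND PROOFS =====

lemma pv_takeWhile_all {p : String → Bool} {cur : List String} (h : ∀ x ∈ cur, p x = true)
    (xs : List String) : (cur ++ xs).takeWhile p = cur ++ xs.takeWhile p := by
  induction cur with
  | nil => simp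
  | cons c cs ih =>
    simp only [List.cons_append, List.takeWhile_cons, h c (by simp)]
    simp [ih (fun x hx => h x (by simp [hx]))]

lemma pv_dropWhile_all {p : String → Bool} {cur : List String} (h : ∀ x ∈ cur, p x = true)
    (xs : List String) : (cur ++ xs).dropWhile p = xs.dropWhile p := by
  induction cur with
  | nil => simp
  | cons c cs ih =>
    simp only [List.cons_append, List.dropWhile_cons, h c (by simp)]
    exact ih (fun x hx => h x (by simp [hx]))

-- main invariant: A's loop from a nonempty current block whose lines all have
-- table-ness inT computes exactly B's span scan on cur ++ ls.
lemma pv_main (ls : List String) : ∀ (cur : List String) (inT : Bool)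
    (tabs nons : List String), cur ≠ [] → (∀ x ∈ cur, pvIsTable x = inT) →
    pvFinA (ls.foldl pvStepA (tabs, nons, cur, inT)) = pvLoopB (cur ++ ls) tabs nons := by
  induction ls with
  | nil =>
    intro cur inT tabs nons hne hall
    obtain ⟨c, cur', rfl⟩ : ∃ c cur', cur = c :: cur' := by
      cases cur with | nil => exact absurd rfl hne | cons c cs => exact ⟨c, cs, rfl⟩
    have hc : pvIsTable c = inT := hall c (by simp)
    have hcur' : ∀ x ∈ cur', (fun x => pvIsTable x == inT) x = true := by
      intro x hx; simp [hall x (by simp [hx])]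
    simp only [List.foldl_nil, List.append_nil, pvLoopB, hc]
    rw [show cur' = cur' ++ ([] : List String) by simp, pv_takeWhile_all hcur',
        pv_dropWhile_all hcur']
    cases inT <;> simp [pvFinA, pvLoopB]
  | cons l ls ih =>
    intro cur inT tabs nons hne hall
    obtain ⟨c, cur', rfl⟩ : ∃ c cur', cur = c :: cur' := by
      cases cur with | nil => exact absurd rfl hne | cons c cs => exact ⟨c, cs, rfl⟩
    have hc : pvIsTable c = inT := hall c (by simp)
    have hcur' : ∀ x ∈ cur', (fun x => pvIsTable x == inT) x = true := by
      intro x hx; simp [hall x (by simp [hx])]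
    by_cases hl : pvIsTable l = inT
    · have hstep : pvStepA (tabs, nons, c :: cur', inT) l = (tabs, nons, (c :: cur') ++ [l], inT) := by
        cases inT <;> simp_all [pvStepA]
      rw [List.foldl_cons, hstep,
          ih ((c :: cur') ++ [l]) inT tabs nons (by simp) (by
            intro x hx
            rcases List.mem_append.1 hx with h | h
            · exact hall x h
            · have hxl : x = l := by simpa using h
              rw [hxl]; exact hl)]
      simp
    · have hstep : pvStepA (tabs, nons, c :: cur', inT) l =
          (if inT then (tabs ++ [PySem.Str.join "\n" (c :: cur')], nons, [l], pvIsTable l)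
           else (tabs, nons ++ [PySem.Str.join "\n" (c :: cur')], [l], pvIsTable l)) := by
        cases inT <;> simp_all [pvStepA]
      have hrhs : pvLoopB ((c :: cur') ++ (l :: ls)) tabs nons =
          (if inT then pvLoopB (l :: ls) (tabs ++ [PySem.Str.join "\n" (c :: cur')]) nons
           else pvLoopB (l :: ls) tabs (nons ++ [PySem.Str.join "\n" (c :: cur')])) := by
        rw [List.cons_append, pvLoopB]
        simp only [hc]
        rw [pv_takeWhile_all hcur', pv_dropWhile_all hcur']
        rw [List.takeWhile_cons, List.dropWhile_cons]
        simp only [show (pvIsTable l == inT) = false from by simp [hl]]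
        cases inT <;> simp
      rw [List.foldl_cons, hstep, hrhs]
      cases inT <;>
        simpa using ih [l] (pvIsTable l) _ _ (by simp) (by intro x hx; simp_all)

-- ===== VERDICT (by name: the statement is the Claim_ definition above) =====
theorem extract_table_blocks_py_spec : Claim_equal_extract_table_blocks_py := by
  intro text _
  unfold Spec_extract_table_blocks_py extract_table_blocks_py extract_table_blocks_py_alt
  cases hls : ((PySem.Str.split? text "\n").getD []) with
  | nil => simp [pvFinA, pvLoopB]
  | cons l ls =>
    have hstep : pvStepA ([], [], [], false) l = ([], [], [l], pvIsTable l) := by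
      by_cases h : pvIsTable l = true <;> simp_all [pvStepA]
    rw [List.foldl_cons, hstep,
        pv_main ls [l] (pvIsTable l) [] [] (by simp) (by intro x hx; simp_all)]
    simp
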